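-- pv_equiv track=rewrite | github.com/nicolay-r/tone-classifier | models/core/msg.py | __sentiment_bigram_filter
-- ===== SOURCE A (Python) =====
-- def __sentiment_bigram_filter(terms, tone_prefixes):
--     """
--     Transforms bigrams 'term1 term2' into '+term2' or '-term2' according
--     to the 'tone_prefixes' argument.
--
--     Returns
--     -------
--         unicode_terms -- filtered list in which some of terms has been
--                          replaced by '+'/'-' char, which becomes a prefix
--                          of the following term.
--     """
--     to_remove = []
--     i = 0
--     while i < len(terms) - 1:
--         bigram = terms[i] + ' ' + terms[i + 1]
--         if (bigram in tone_prefixes) and (i < len(terms)-2):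
--             terms[i + 2] = tone_prefixes[bigram] + terms[i + 2]
--             to_remove.append(i)
--             to_remove.append(i + 1)
--             i += 3
--         else:
--             unigram = terms[i]
--             if (unigram in tone_prefixes):
--                 terms[i + 1] = tone_prefixes[unigram] + terms[i + 1]
--                 to_remove.append(i)
--                 i += 2
--             else:
--                 i += 1
--     # Filter
--     terms = [terms[term_index]
--              for term_index in range(len(terms))
--              if not(term_index in to_remove)]
--     return terms
-- ===== SOURCE B (Python) =====
-- def __sentiment_bigram_filter(terms, tone_prefixes):
--     """State-machine single pass over enumerate(terms): no removal-index list,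
--     no second filtering pass, and no in-place mutation of `terms` (A mutates
--     its argument; B matches A's return value only).
--     state 0 = scanning, 2 = skip the consumed second bigram term,
--     1 = emit the current term with the stored tone prefix."""
--     n = len(terms)
--     out = []
--     state = 0
--     prefix = ''
--     for j, t in enumerate(terms):
--         if state == 2:
--             state = 1
--         elif state == 1:
--             out.append(prefix + t)
--             state = 0
--         elif j == n - 1:
--             out.append(t)
--         elif j < n - 2 and (t + ' ' + terms[j + 1]) in tone_prefixes:
--             prefix = tone_prefixes[t + ' ' + terms[j + 1]]
--             state = 2
--         elif t in tone_prefixes: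
--             prefix = tone_prefixes[t]
--             state = 1
--         else:
--             out.append(t)
--     return out
-- ===== Notes on version B (the rewrite author's own statement) =====
-- stated objective: faster
-- what changed: B replaces A's jumping while loop with in-place mutation, a to_remove index list and a second filtering pass (which tests every index against to_remove) by a single uniform for-loop over enumerate(terms) driven by a small state machine (scan / skip / emit-with-prefix) that builds the output directly and never mutates the argument.
import Mathlib
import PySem

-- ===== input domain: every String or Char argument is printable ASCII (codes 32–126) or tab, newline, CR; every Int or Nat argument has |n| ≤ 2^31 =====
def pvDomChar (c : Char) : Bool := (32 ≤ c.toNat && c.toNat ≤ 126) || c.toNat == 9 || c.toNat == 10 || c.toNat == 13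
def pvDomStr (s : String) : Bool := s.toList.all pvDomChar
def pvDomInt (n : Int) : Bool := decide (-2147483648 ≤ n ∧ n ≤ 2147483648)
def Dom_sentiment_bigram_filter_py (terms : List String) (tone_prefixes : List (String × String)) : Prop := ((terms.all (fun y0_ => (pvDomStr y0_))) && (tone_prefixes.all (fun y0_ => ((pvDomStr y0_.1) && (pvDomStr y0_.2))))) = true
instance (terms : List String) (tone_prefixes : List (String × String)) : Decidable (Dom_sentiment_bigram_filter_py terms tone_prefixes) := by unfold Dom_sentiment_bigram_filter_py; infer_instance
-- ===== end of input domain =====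

-- B replaces A's jumping while loop + to_remove list + second filtering pass by one
-- uniform for-loop over enumerate(terms) with a 3-state machine building the output
-- directly (objective: alternative). NOTE: the Python A mutates `terms` in place and
-- B does not; the equivalence proved here is about the RETURN value only.

-- ===== PORT A =====
-- A's while loop: state (terms, to_remove, i); the local names bigram/unigram are
-- inlined. All indexing is provably in range (i+1 < len, and i+2 < len in the
-- bigram branch), so getD/set are exact for Python's terms[j] and assignment.
-- fuel only makes the recursion structural; fuel = terms.length always suffices
-- (each iteration increases i by ≥ 1 and the loop stops once i + 1 ≥ length).
def pvALoop (tp : PySem.Dict String String) (fuel : Nat) (terms : List String)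
    (to_remove : List Nat) (i : Nat) : List String × List Nat :=
  match fuel with
  | 0 => (terms, to_remove)
  | fuel + 1 =>
  if i + 1 < terms.length then
    if tp.contains (terms.getD i "" ++ " " ++ terms.getD (i+1) "") ∧ i + 2 < terms.length then
      pvALoop tp fuel
        (terms.set (i+2) (tp.getD (terms.getD i "" ++ " " ++ terms.getD (i+1) "") "" ++ terms.getD (i+2) ""))
        (to_remove ++ [i, i+1]) (i+3)
    else if tp.contains (terms.getD i "") then
      pvALoop tp fuel
        (terms.set (i+1) (tp.getD (terms.getD i "") "" ++ terms.getD (i+1) ""))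
        (to_remove ++ [i]) (i+2)
    else
      pvALoop tp fuel terms to_remove (i+1)
  else (terms, to_remove)

def sentiment_bigram_filter_py (terms : List String) (tone_prefixes : List (String × String)) : List String :=
  let tp := PySem.Dict.ofList tone_prefixes
  let p := pvALoop tp terms.length terms [] 0
  ((List.range p.1.length).filter (fun j => !(p.2.contains j))).map (fun j => p.1.getD j "")

-- ===== PORT B =====
-- One step of B's for-loop body: accumulator (out, state, prefix); the loop
-- variable is the enumerate pair (j, t). `terms[j+1]` is the lookahead read
-- B's Python does by index (always in range: state 0 and j + 2 < n there).
def pvBStep (tp : PySem.Dict String String) (terms : List String)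
    (acc : List String × Nat × String) (jt : Int × String) : List String × Nat × String :=
  match acc, jt with
  | (out, state, pfx), (j, t) =>
    if state = 2 then (out, 1, pfx)
    else if state = 1 then (out ++ [pfx ++ t], 0, pfx)
    else if j + 1 = (terms.length : Int) then (out ++ [t], state, pfx)
    else if j + 2 < (terms.length : Int) ∧ tp.contains (t ++ " " ++ PySem.List.pyGetD terms (j+1) "") then
      (out, 2, tp.getD (t ++ " " ++ PySem.List.pyGetD terms (j+1) "") "")
    else if tp.contains t then (out, 1, tp.getD t "")
    else (out ++ [t], state, pfx)

def sentiment_bigram_filter_py_alt (terms : List String) (tone_prefixes : List (String × String)) : List String :=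
  ((PySem.List.enumerate terms 0).foldl
    (pvBStep (PySem.Dict.ofList tone_prefixes) terms) ([], 0, "")).1

-- ===== PRECONDITION & SPEC =====
def Spec_sentiment_bigram_filter_py (terms : List String) (tone_prefixes : List (String × String)) (out : List String) : Prop := out = sentiment_bigram_filter_py_alt terms tone_prefixes
instance (terms : List String) (tone_prefixes : List (String × String)) (out : List String) : Decidable (Spec_sentiment_bigram_filter_py terms tone_prefixes out) := by unfold Spec_sentiment_bigram_filter_py; infer_instance

-- ===== CLAIM (what is proved, stated in full; the proofs are below) =====
def Claim_equal_sentiment_bigram_filter_py : Prop := ∀ (terms : List String) (tone_prefixes : List (String × String)), Dom_sentiment_bigram_filter_py terms tone_prefixes → Spec_sentiment_bigram_filter_py terms tone_prefixes (sentiment_bigram_filter_py terms tone_prefixes)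

-- ===== LEMMAS AND PROOFS =====

-- A's post-loop filter, as a function of the loop's final state.
def pvFilt (t : List String) (rm : List Nat) : List String :=
  ((List.range t.length).filter (fun j => !(rm.contains j))).map (fun j => t.getD j "")

-- The output B has accumulated when its scan reaches position i, via A's state.
def pvPref (t : List String) (rm : List Nat) (i : Nat) : List String :=
  ((List.range i).filter (fun j => !(rm.contains j))).map (fun j => t.getD j "")

-- B's fold over the enumerated suffix of the (never mutated) original list.
def pvBFold (tp : PySem.Dict String String) (T : List String) (i : Nat)
    (acc : List String × Nat × String) : List String × Nat × String :=
  (PySem.List.enumerate (T.drop i) (i : Int)).foldl (pvBStep tp T) acc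

-- pvBStep in scanning state, with the leading state tests discharged
lemma pvBStep0 (tp : PySem.Dict String String) (terms : List String)
    (out : List String) (p0 : String) (j : Int) (t : String) :
    pvBStep tp terms (out, 0, p0) (j, t) =
      (if j + 1 = (terms.length : Int) then (out ++ [t], 0, p0)
      else if j + 2 < (terms.length : Int) ∧ tp.contains (t ++ " " ++ PySem.List.pyGetD terms (j+1) "") then
        (out, 2, tp.getD (t ++ " " ++ PySem.List.pyGetD terms (j+1) "") "")
      else if tp.contains t then (out, 1, tp.getD t "")
      else (out ++ [t], 0, p0)) := rfl

lemma pvContains_false {rm : List Nat} {j i : Nat} (hrm : ∀ k ∈ rm, k < i) (hj : i ≤ j) :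
    rm.contains j = false := by
  simp only [List.contains_eq_mem, decide_eq_false_iff_not]
  intro h; exact absurd (hrm j h) (by omega)

lemma pvPref_succ_mem (t : List String) (rm : List Nat) (i : Nat) (h : rm.contains i = true) :
    pvPref t rm (i+1) = pvPref t rm i := by
  unfold pvPref
  have hm : i ∈ rm := by simpa using h
  rw [List.range_succ, List.filter_append, List.map_append]
  simp [hm]

lemma pvPref_succ_not_mem (t : List String) (rm : List Nat) (i : Nat) (h : rm.contains i = false) :
    pvPref t rm (i+1) = pvPref t rm i ++ [t.getD i ""] := by
  unfold pvPref
  have hm : i ∉ rm := by simpa using h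
  rw [List.range_succ, List.filter_append, List.map_append]
  simp [hm, List.getD_eq_getElem?_getD]

lemma pvPref_append_ge (t : List String) (rm l : List Nat) (i : Nat) (h : ∀ j ∈ l, i ≤ j) :
    pvPref t (rm ++ l) i = pvPref t rm i := by
  unfold pvPref
  congr 1
  apply List.filter_congr
  intro j hj
  simp only [List.mem_range] at hj
  have hnl : j ∉ l := by
    intro hm; exact absurd (h j hm) (by omega)
  simp [hnl]

lemma pvPref_set_ge (t : List String) (rm : List Nat) (i k : Nat) (v : String) (h : i ≤ k) :
    pvPref (t.set k v) rm i = pvPref t rm i := by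
  unfold pvPref
  apply List.map_congr_left
  intro j hj
  have hji : j < i := by
    have := List.mem_filter.mp hj
    simpa using this.1
  rw [List.getD_eq_getElem?_getD, List.getD_eq_getElem?_getD, List.getElem?_set_ne (by omega)]

lemma pvFilt_base (t : List String) (rm : List Nat) (i : Nat)
    (hrm : ∀ j ∈ rm, j < i) (hi : i ≤ t.length) (hlen : t.length ≤ i + 1) :
    pvFilt t rm = pvPref t rm i ++ t.drop i := by
  have hfp : pvFilt t rm = pvPref t rm t.length := rfl
  rcases Nat.eq_or_lt_of_le hi with he | hl
  · subst he
    rw [List.drop_length, List.append_nil]; exact hfp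
  · have he : t.length = i + 1 := by omega
    rw [hfp, he, pvPref_succ_not_mem t rm i (pvContains_false hrm (le_refl i))]
    congr 1
    have h1 : i < t.length := by omega
    rw [List.drop_eq_getElem_cons h1, List.getD_eq_getElem?_getD]
    simp [List.getElem?_eq_getElem h1, List.drop_eq_nil_of_le (by omega : t.length ≤ i + 1)]

-- positions ≥ i agree between A's mutated list and the original list
lemma pvGetD_suffix {t T : List String} {i k : Nat}
    (hd : t.drop i = T.drop i) (hk : i ≤ k) : t.getD k "" = T.getD k "" := by
  rw [List.getD_eq_getElem?_getD, List.getD_eq_getElem?_getD]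
  have h1 : t[k]? = (t.drop i)[k - i]? := by rw [List.getElem?_drop]; congr 1; omega
  have h2 : T[k]? = (T.drop i)[k - i]? := by rw [List.getElem?_drop]; congr 1; omega
  rw [h1, h2, hd]

lemma pvDrop_set {t : List String} {k j : Nat} (v : String) (h : k < j) :
    (t.set k v).drop j = t.drop j := by
  apply List.ext_getElem?
  intro m
  rw [List.getElem?_drop, List.getElem?_drop, List.getElem?_set_ne (by omega)]

-- unfold one iteration of B's fold
lemma pvBFold_cons {tp : PySem.Dict String String} {T : List String} {i : Nat}
    (acc : List String × Nat × String) (h : i < T.length) :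
    pvBFold tp T i acc = pvBFold tp T (i+1) (pvBStep tp T acc ((i : Int), T[i])) := by
  unfold pvBFold
  rw [List.drop_eq_getElem_cons h, PySem.List.enumerate_cons]
  push_cast
  rfl

lemma pvBFold_exit {tp : PySem.Dict String String} {T t : List String} {i : Nat}
    (out : List String) (p0 : String)
    (hd : t.drop i = T.drop i) (hi : i ≤ T.length) (hlen : T.length ≤ i + 1) :
    (pvBFold tp T i (out, 0, p0)).1 = out ++ t.drop i := by
  rcases Nat.eq_or_lt_of_le hi with he | hl
  · have h1 : T.drop i = [] := List.drop_eq_nil_of_le (by omega)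
    rw [hd, h1]
    simp [pvBFold, h1]
  · have hiT : i < T.length := hl
    have he : T.length = i + 1 := by omega
    rw [pvBFold_cons _ hiT]
    have hstep : pvBStep tp T (out, 0, p0) ((i : Int), T[i]) = (out ++ [T[i]], 0, p0) := by
      rw [pvBStep0, if_pos (by rw [he]; push_cast; ring)]
    rw [hstep]
    have h1 : T.drop (i+1) = [] := List.drop_eq_nil_of_le (by omega)
    rw [hd, List.drop_eq_getElem_cons hiT, h1]
    simp [pvBFold, h1]

lemma pvMain (tp : PySem.Dict String String) (T : List String) :
    ∀ d t rm i p0, t.length = T.length → t.drop i = T.drop i →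
    (∀ j ∈ rm, j < i) → i ≤ t.length → t.length - i ≤ d →
    pvFilt (pvALoop tp d t rm i).1 (pvALoop tp d t rm i).2
      = (pvBFold tp T i (pvPref t rm i, 0, p0)).1 := by
  intro d
  induction d with
  | zero =>
    intro t rm i p0 hl hd hrm hi hfuel
    have he : i = t.length := by omega
    rw [pvALoop]
    rw [pvFilt_base t rm i hrm hi (by omega),
        pvBFold_exit _ _ hd (by omega) (by omega)]
  | succ d ih =>
    intro t rm i p0 hl hd hrm hi hfuel
    rw [pvALoop]
    by_cases h1 : i + 1 < t.length
    · have hiT : i < T.length := by omega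
      have hi1T : i + 1 < T.length := by omega
      have g0 : t.getD i "" = T.getD i "" := pvGetD_suffix hd (le_refl i)
      have g1 : t.getD (i+1) "" = T.getD (i+1) "" := pvGetD_suffix hd (by omega)
      have gT0 : T.getD i "" = T[i] := by
        rw [List.getD_eq_getElem?_getD, List.getElem?_eq_getElem hiT]; rfl
      have gT1 : T.getD (i+1) "" = T[i+1] := by
        rw [List.getD_eq_getElem?_getD, List.getElem?_eq_getElem hi1T]; rfl
      have gpy1 : PySem.List.pyGetD T ((i : Int) + 1) "" = T.getD (i+1) "" := by
        have : ((i : Int) + 1) = ((i + 1 : Nat) : Int) := by push_cast; ring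
        rw [this, PySem.List.pyGetD_natCast]
      rw [if_pos h1]
      by_cases h2 : tp.contains (t.getD i "" ++ " " ++ t.getD (i+1) "") = true ∧ i + 2 < t.length
      · -- bigram branch: three B steps (scan → skip → emit)
        have hi2T : i + 2 < T.length := by omega
        have g2 : t.getD (i+2) "" = T.getD (i+2) "" := pvGetD_suffix hd (by omega)
        have gT2 : T.getD (i+2) "" = T[i+2] := by
          rw [List.getD_eq_getElem?_getD, List.getElem?_eq_getElem hi2T]; rfl
        set pfx := tp.getD (t.getD i "" ++ " " ++ t.getD (i+1) "") "" with hpfx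
        set t' := t.set (i+2) (pfx ++ t.getD (i+2) "") with ht'
        rw [if_pos h2]
        have hd' : t'.drop (i+3) = T.drop (i+3) := by
          rw [ht', pvDrop_set _ (by omega)]
          apply List.ext_getElem?
          intro m
          rw [List.getElem?_drop, List.getElem?_drop]
          have h1' : t[i + 3 + m]? = (t.drop i)[3 + m]? := by
            rw [List.getElem?_drop]; congr 1; omega
          have h2' : T[i + 3 + m]? = (T.drop i)[3 + m]? := by
            rw [List.getElem?_drop]; congr 1; omega
          rw [h1', h2', hd]
        rw [ih t' (rm ++ [i, i+1]) (i+3) pfx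
             (by rw [ht', List.length_set]; exact hl)
             hd'
             (by intro j hj
                 simp only [List.mem_append, List.mem_cons] at hj
                 rcases hj with hj | hj | hj
                 · exact lt_of_lt_of_le (hrm j hj) (by omega)
                 · omega
                 · simp at hj; omega)
             (by rw [ht', List.length_set]; omega)
             (by rw [ht', List.length_set]; omega)]
        -- unfold three steps of B's fold
        rw [pvBFold_cons _ hiT, pvBFold_cons _ hi1T, pvBFold_cons _ hi2T]
        congr 2
        have hb : (i : Int) + 2 < (T.length : Int)
            ∧ tp.contains (T[i] ++ " " ++ PySem.List.pyGetD T ((i : Int)+1) "") = true := by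
          refine ⟨by omega, ?_⟩
          rw [gpy1, ← gT0, ← g0, ← g1]; exact h2.1
        have s1 : pvBStep tp T (pvPref t rm i, 0, p0) ((i : Int), T[i])
            = (pvPref t rm i, 2, tp.getD (T[i] ++ " " ++ T.getD (i+1) "") "") := by
          rw [pvBStep0, if_neg (by omega), if_pos hb, gpy1]
        have s2 : pvBStep tp T (pvPref t rm i, 2, tp.getD (T[i] ++ " " ++ T.getD (i+1) "") "")
            (((i + 1 : Nat) : Int), T[i+1])
            = (pvPref t rm i, 1, tp.getD (T[i] ++ " " ++ T.getD (i+1) "") "") := rfl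
        have s3 : pvBStep tp T (pvPref t rm i, 1, tp.getD (T[i] ++ " " ++ T.getD (i+1) "") "")
            (((i + 2 : Nat) : Int), T[i+2])
            = (pvPref t rm i ++ [tp.getD (T[i] ++ " " ++ T.getD (i+1) "") "" ++ T[i+2]], 0,
               tp.getD (T[i] ++ " " ++ T.getD (i+1) "") "") := rfl
        rw [s1, s2, s3]
        have hpfxeq : pfx = tp.getD (T[i] ++ " " ++ T.getD (i+1) "") "" := by
          rw [hpfx, g0, g1, gT0]
        refine Prod.ext ?_ (Prod.ext rfl ?_)
        · -- accumulated output equality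
          have c2 : (rm ++ [i, i+1]).contains (i+2) = false := by
            rw [List.contains_append, pvContains_false hrm (by omega : i ≤ i + 2)]
            simp
          have c1 : (rm ++ [i, i+1]).contains (i+1) = true := by
            rw [List.contains_append]; simp
          have c0 : (rm ++ [i, i+1]).contains i = true := by
            rw [List.contains_append]; simp
          rw [pvPref_succ_not_mem _ _ _ c2, pvPref_succ_mem _ _ _ c1, pvPref_succ_mem _ _ _ c0,
              pvPref_append_ge _ rm [i, i+1] i (by intro j hj; simp at hj; omega),
              pvPref_set_ge t rm i (i+2) _ (by omega)]
          have : t'.getD (i+2) "" = pfx ++ T[i+2] := by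
            rw [ht', List.getD_eq_getElem?_getD, List.getElem?_set_self (by omega), ← gT2, ← g2]
            rfl
          rw [this, hpfxeq]
        · exact hpfxeq
      · rw [if_neg h2]
        by_cases h3 : tp.contains (t.getD i "") = true
        · -- unigram branch: two B steps (scan → emit)
          set pfx := tp.getD (t.getD i "") "" with hpfx
          set t' := t.set (i+1) (pfx ++ t.getD (i+1) "") with ht'
          rw [if_pos h3]
          have hd' : t'.drop (i+2) = T.drop (i+2) := by
            rw [ht', pvDrop_set _ (by omega)]
            apply List.ext_getElem?
            intro m
            rw [List.getElem?_drop, List.getElem?_drop]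
            have h1' : t[i + 2 + m]? = (t.drop i)[2 + m]? := by
              rw [List.getElem?_drop]; congr 1; omega
            have h2' : T[i + 2 + m]? = (T.drop i)[2 + m]? := by
              rw [List.getElem?_drop]; congr 1; omega
            rw [h1', h2', hd]
          rw [ih t' (rm ++ [i]) (i+2) pfx
               (by rw [ht', List.length_set]; exact hl)
               hd'
               (by intro j hj
                   simp only [List.mem_append, List.mem_singleton] at hj
                   rcases hj with hj | hj
                   · exact lt_of_lt_of_le (hrm j hj) (by omega)
                   · omega)
               (by rw [ht', List.length_set]; omega)
               (by rw [ht', List.length_set]; omega)]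
          rw [pvBFold_cons _ hiT, pvBFold_cons _ hi1T]
          congr 2
          have hnb : ¬ ((i : Int) + 2 < (T.length : Int)
              ∧ tp.contains (T[i] ++ " " ++ PySem.List.pyGetD T ((i : Int)+1) "") = true) := by
            rintro ⟨hb1, hb2⟩
            apply h2
            refine ⟨?_, by omega⟩
            rw [g0, g1, gT0]
            rw [gpy1] at hb2
            exact hb2
          have s1 : pvBStep tp T (pvPref t rm i, 0, p0) ((i : Int), T[i])
              = (pvPref t rm i, 1, tp.getD (T[i]) "") := by
            rw [pvBStep0, if_neg (by omega), if_neg hnb,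
                if_pos (by rw [← gT0, ← g0]; exact h3)]
          have s2 : pvBStep tp T (pvPref t rm i, 1, tp.getD (T[i]) "")
              (((i + 1 : Nat) : Int), T[i+1])
              = (pvPref t rm i ++ [tp.getD (T[i]) "" ++ T[i+1]], 0, tp.getD (T[i]) "") := rfl
          rw [s1, s2]
          have hpfxeq : pfx = tp.getD (T[i]) "" := by rw [hpfx, g0, gT0]
          refine Prod.ext ?_ (Prod.ext rfl ?_)
          · have c1 : (rm ++ [i]).contains (i+1) = false := by
              rw [List.contains_append, pvContains_false hrm (by omega : i ≤ i + 1)]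
              simp
            have c0 : (rm ++ [i]).contains i = true := by
              rw [List.contains_append]; simp
            rw [pvPref_succ_not_mem _ _ _ c1, pvPref_succ_mem _ _ _ c0,
                pvPref_append_ge _ rm [i] i (by intro j hj; simp at hj; omega),
                pvPref_set_ge t rm i (i+1) _ (by omega)]
            have : t'.getD (i+1) "" = pfx ++ T[i+1] := by
              rw [ht', List.getD_eq_getElem?_getD, List.getElem?_set_self (by omega), ← gT1, ← g1]
              rfl
            rw [this, hpfxeq]
          · exact hpfxeq
        · -- else branch: one B step (emit current term)
          rw [if_neg h3,
              ih t rm (i+1) p0 hl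
                (by apply List.ext_getElem?
                    intro m
                    rw [List.getElem?_drop, List.getElem?_drop]
                    have h1' : t[i + 1 + m]? = (t.drop i)[1 + m]? := by
                      rw [List.getElem?_drop]; congr 1; omega
                    have h2' : T[i + 1 + m]? = (T.drop i)[1 + m]? := by
                      rw [List.getElem?_drop]; congr 1; omega
                    rw [h1', h2', hd])
                (by intro j hj; exact lt_of_lt_of_le (hrm j hj) (by omega))
                (by omega) (by omega)]
          rw [pvBFold_cons _ hiT]
          congr 2
          have hnb : ¬ ((i : Int) + 2 < (T.length : Int)
              ∧ tp.contains (T[i] ++ " " ++ PySem.List.pyGetD T ((i : Int)+1) "") = true) := by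
            rintro ⟨hb1, hb2⟩
            apply h2
            refine ⟨?_, by omega⟩
            rw [g0, g1, gT0]
            rw [gpy1] at hb2
            exact hb2
          have s1 : pvBStep tp T (pvPref t rm i, 0, p0) ((i : Int), T[i])
              = (pvPref t rm i ++ [T[i]], 0, p0) := by
            rw [pvBStep0, if_neg (by omega), if_neg hnb,
                if_neg (by rw [← gT0, ← g0]; exact h3)]
          rw [s1]
          refine Prod.ext ?_ rfl
          rw [pvPref_succ_not_mem _ _ _ (pvContains_false hrm (le_refl i)), g0, gT0]
    · rw [if_neg h1]
      rw [pvFilt_base t rm i hrm hi (by omega),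
          pvBFold_exit _ _ hd (by omega) (by omega)]

-- ===== VERDICT (by name: the statement is the Claim_ definition above) =====
theorem sentiment_bigram_filter_py_spec : Claim_equal_sentiment_bigram_filter_py := by
  intro terms tone_prefixes _
  unfold Spec_sentiment_bigram_filter_py sentiment_bigram_filter_py sentiment_bigram_filter_py_alt
  have h := pvMain (PySem.Dict.ofList tone_prefixes) terms terms.length terms [] 0 ""
    rfl rfl (by simp) (by omega) (by omega)
  simpa [pvFilt, pvPref, pvBFold] using h
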